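-- pv_equiv track=rewrite | github.com/SkyTemple/skytemple-files | skytemple_files/common/dungeon_floor_generator/dungeon_eos/DungeonAlgorithm.py | generate_grid_positions
-- ===== SOURCE A (Python) =====
-- def generate_grid_positions(max_nb_room_x, max_nb_room_y):
--     sum_x = 0
--     list_x = []
--     for x in range(max_nb_room_x+1):
--         list_x.append(sum_x)
--         sum_x += 0x38//max_nb_room_x
--     sum_y = 0
--     list_y = []
--     for y in range(max_nb_room_y+1):
--         list_y.append(sum_y)
--         sum_y += 0x20//max_nb_room_y
--     return list_x, list_y
-- ===== SOURCE B (Python) =====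
-- def generate_grid_positions(max_nb_room_x, max_nb_room_y):
--     list_x = [x * (0x38 // max_nb_room_x) for x in range(max_nb_room_x + 1)]
--     list_y = [y * (0x20 // max_nb_room_y) for y in range(max_nb_room_y + 1)]
--     return list_x, list_y
-- ===== Notes on version B (the rewrite author's own statement) =====
-- stated objective: simpler
-- what changed: Replaced the two running-sum accumulator loops by closed-form per-index multiplication (i * step) in two list comprehensions.
import Mathlib
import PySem

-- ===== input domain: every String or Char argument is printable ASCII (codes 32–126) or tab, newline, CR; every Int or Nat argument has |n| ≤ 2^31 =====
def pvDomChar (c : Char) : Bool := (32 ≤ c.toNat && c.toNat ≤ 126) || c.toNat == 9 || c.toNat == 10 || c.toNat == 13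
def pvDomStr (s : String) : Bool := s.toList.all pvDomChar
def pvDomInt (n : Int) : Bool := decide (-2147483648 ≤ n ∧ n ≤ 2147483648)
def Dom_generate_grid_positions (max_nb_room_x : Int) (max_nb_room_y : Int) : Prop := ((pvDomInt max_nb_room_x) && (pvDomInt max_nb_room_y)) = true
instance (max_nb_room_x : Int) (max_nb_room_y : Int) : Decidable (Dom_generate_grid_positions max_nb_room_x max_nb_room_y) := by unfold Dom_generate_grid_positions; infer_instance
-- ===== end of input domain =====

-- B replaces A's two running-sum accumulator loops by closed-form per-index multiplication (simpler).

-- ===== PORT A =====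
-- literal transliteration: each loop carries (list, running sum) and appends the sum, then adds the step
def generate_grid_positions (max_nb_room_x : Int) (max_nb_room_y : Int) : List Int × List Int :=
  let px := (PySem.List.pyRange 0 (max_nb_room_x + 1) 1).foldl
      (fun (st : List Int × Int) (_ : Int) =>
        (st.1 ++ [st.2], st.2 + PySem.Int.floordiv 0x38 max_nb_room_x)) ([], 0)
  let py := (PySem.List.pyRange 0 (max_nb_room_y + 1) 1).foldl
      (fun (st : List Int × Int) (_ : Int) =>
        (st.1 ++ [st.2], st.2 + PySem.Int.floordiv 0x20 max_nb_room_y)) ([], 0)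
  (px.1, py.1)

-- ===== PORT B =====
def generate_grid_positions_alt (max_nb_room_x : Int) (max_nb_room_y : Int) : List Int × List Int :=
  ((PySem.List.pyRange 0 (max_nb_room_x + 1) 1).map (fun x => x * PySem.Int.floordiv 0x38 max_nb_room_x),
   (PySem.List.pyRange 0 (max_nb_room_y + 1) 1).map (fun y => y * PySem.Int.floordiv 0x20 max_nb_room_y))

-- ===== PRECONDITION & SPEC =====
-- Pre_ excludes exactly max_nb_room_x = 0 or max_nb_room_y = 0, where the Python A raises ZeroDivisionError.
def Pre_generate_grid_positions (max_nb_room_x : Int) (max_nb_room_y : Int) : Prop :=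
  max_nb_room_x ≠ 0 ∧ max_nb_room_y ≠ 0
instance (max_nb_room_x : Int) (max_nb_room_y : Int) : Decidable (Pre_generate_grid_positions max_nb_room_x max_nb_room_y) := by unfold Pre_generate_grid_positions; infer_instance

def pvWitness_generate_grid_positions : Int × Int := (4, 3)

def Spec_generate_grid_positions (max_nb_room_x : Int) (max_nb_room_y : Int) (out : List Int × List Int) : Prop := out = generate_grid_positions_alt max_nb_room_x max_nb_room_y
instance (max_nb_room_x : Int) (max_nb_room_y : Int) (out : List Int × List Int) : Decidable (Spec_generate_grid_positions max_nb_room_x max_nb_room_y out) := by unfold Spec_generate_grid_positions; infer_instance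

-- ===== CLAIM =====
def Claim_equal_generate_grid_positions : Prop := ∀ (max_nb_room_x : Int) (max_nb_room_y : Int), Dom_generate_grid_positions max_nb_room_x max_nb_room_y → Pre_generate_grid_positions max_nb_room_x max_nb_room_y → Spec_generate_grid_positions max_nb_room_x max_nb_room_y (generate_grid_positions max_nb_room_x max_nb_room_y)

-- ===== LEMMAS AND PROOFS =====

-- A's accumulator loop, generalized over the start value: appending the running sum at
-- each step produces exactly the arithmetic progression c, c+s, …
lemma acc_loop_eq_map (l : List Int) (s : Int) :
    ∀ (acc : List Int) (c : Int),
      (l.foldl (fun (st : List Int × Int) (_ : Int) => (st.1 ++ [st.2], st.2 + s)) (acc, c)).1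
        = acc ++ (List.range l.length).map (fun i : Nat => c + (i : Int) * s) := by
  induction l with
  | nil => intro acc c; simp
  | cons hd tl ih =>
      intro acc c
      rw [List.foldl_cons, ih, List.length_cons, List.range_succ_eq_map]
      simp only [List.map_cons, List.map_map, List.append_assoc, List.singleton_append,
        Nat.cast_zero, zero_mul, add_zero]
      congr 2
      apply List.map_congr_left
      intro i _
      simp only [Function.comp_apply]
      push_cast
      ring

lemma loop_eq_progression (n s : Int) :
    ((PySem.List.pyRange 0 n 1).foldl
        (fun (st : List Int × Int) (_ : Int) => (st.1 ++ [st.2], st.2 + s)) ([], 0)).1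
      = (PySem.List.pyRange 0 n 1).map (fun x => x * s) := by
  rw [acc_loop_eq_map, PySem.List.pyRange_one 0 n]
  simp [List.map_map, Function.comp]


theorem generate_grid_positions_spec : Claim_equal_generate_grid_positions := by
  intro mx my _ _
  unfold Spec_generate_grid_positions generate_grid_positions generate_grid_positions_alt
  simp only [loop_eq_progression]
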